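-- pv_equiv track=rewrite | github.com/alopezccordero/Python-class | homework1dir/homework1.py | FindInfected
-- ===== SOURCE A (Python) =====
-- def FindInfected(infected, lines, patients):
--     NewLines = lines
--
--     UpdatedList = patients
--     CurrentInfected = None
--     for x in range(2, len(lines) - 1):
--
--         if f"{infected}" in lines[x]:
--
--             a, b = map(int, lines[x].split())
--
--             if a == infected:
--                 CurrentInfected = b
--             elif b == infected:
--                 CurrentInfected = a
--
--             if CurrentInfected not in patients and CurrentInfected is not None:
--                 patients.append(CurrentInfected)
--
--                 NewLines[x] = "USED"
--                 g = FindInfected(CurrentInfected, NewLines, patients)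
--             CurrentInfected = None
--
--     return UpdatedList, NewLines
-- ===== SOURCE B (Python) =====
-- def FindInfected(infected, lines, patients):
--     # Same traversal as an explicit-stack DFS instead of recursion: each stack
--     # frame is (node, next line index to scan).  Lines are split only when the
--     # node's string occurs in them, exactly as the original (so the same
--     # malformed lines raise ValueError).  Mutates lines/patients in place like
--     # the original; returns the same (patients, lines) pair.
--     end = len(lines) - 1
--     stack = [(infected, 2)]
--     while stack:
--         node, x = stack.pop()
--         s = f"{node}"
--         while x < end:
--             line = lines[x]
--             if s in line:
--                 a, b = map(int, line.split())
--                 other = b if a == node else (a if b == node else None)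
--                 if other is not None and other not in patients:
--                     patients.append(other)
--                     lines[x] = "USED"
--                     stack.append((node, x + 1))
--                     stack.append((other, 2))
--                     break
--             x += 1
--     return patients, lines
-- ===== Notes on version B (the rewrite author's own statement) =====
-- stated objective: alternative
-- what changed: B replaces A's nested recursion (one Python call frame per newly infected node, each restarting its own for-loop) with a single explicit-stack DFS loop whose frames carry a resumable line index, performing the identical scan/split/mark steps iteratively.
import Mathlib
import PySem

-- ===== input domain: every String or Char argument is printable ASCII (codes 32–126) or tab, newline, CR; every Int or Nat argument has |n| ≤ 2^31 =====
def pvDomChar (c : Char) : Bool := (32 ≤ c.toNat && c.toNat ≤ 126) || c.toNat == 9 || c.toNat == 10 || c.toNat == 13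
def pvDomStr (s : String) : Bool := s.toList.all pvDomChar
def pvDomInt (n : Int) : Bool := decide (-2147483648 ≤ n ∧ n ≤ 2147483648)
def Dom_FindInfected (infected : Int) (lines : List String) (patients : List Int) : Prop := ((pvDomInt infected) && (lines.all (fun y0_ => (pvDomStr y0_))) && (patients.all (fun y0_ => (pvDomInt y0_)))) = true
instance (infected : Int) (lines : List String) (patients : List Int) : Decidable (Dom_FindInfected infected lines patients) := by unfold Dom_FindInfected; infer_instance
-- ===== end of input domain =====

-- B replaces A's recursion (one call frame per newly infected node) with a single
-- explicit-stack DFS loop over resumable line indices, doing the identical scans;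
-- return-value equivalence only (both Pythons mutate `lines`/`patients` in place identically).

-- ===== PORT A =====

-- `a, b = map(int, line.split())`: `some (a, b)` iff exactly two int tokens (else Python raises ValueError)
def pvParse2 (s : String) : Option (Int × Int) :=
  match PySem.Str.split₀ s with
  | [u, v] =>
    match PySem.Int.ofStr? u, PySem.Int.ofStr? v with
    | some a, some b => some (a, b)
    | _, _ => none
  | _ => none

-- number of lines that still parse as an edge; each recursive call of A turns one of them
-- into "USED", so this (+1) bounds the recursion depth and serves as fuel
def pvLive (lines : List String) : Nat := lines.countP (fun L => (pvParse2 L).isSome)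

def pvGoA (fuel : Nat) (infected : Int) (lines : List String) (patients : List Int)
    (n x : Nat) : List Int × List String :=
  if _h : x < n - 1 then
    let L := lines.getD x ""
    if PySem.Str.isIn (PySem.Int.toStr infected) L then
      match pvParse2 L with
      | some (a, b) =>
        match (if a = infected then some b else if b = infected then some a else none) with
        | some c =>
          if c ∈ patients then pvGoA fuel infected lines patients n (x + 1)
          else
            let patients' := patients ++ [c]
            let lines' := lines.set x "USED"
            match fuel with
            | 0 => (patients', lines')  -- never reached with the fuel FindInfected supplies
            | f + 1 =>
              let r := pvGoA f c lines' patients' n 2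
              pvGoA (f + 1) infected r.2 r.1 n (x + 1)
        | none => pvGoA fuel infected lines patients n (x + 1)
      | none => pvGoA fuel infected lines patients n (x + 1)  -- Python raises ValueError here (outside Pre_)
    else pvGoA fuel infected lines patients n (x + 1)
  else (patients, lines)
termination_by (fuel, n - x)
decreasing_by all_goals simp_wf <;> omega

def FindInfected (infected : Int) (lines : List String) (patients : List Int) :
    List Int × List String :=
  pvGoA (pvLive lines + 1) infected lines patients lines.length 2

-- ===== PORT B =====

-- the inner `while x < end` scan of one stack frame: first line from index x that
-- triggers a new infection; `none` when the scan runs off the end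
def pvScanB (node : Int) (lines : List String) (patients : List Int) (nend x : Nat) :
    Option (Nat × Int) :=
  if _h : x < nend then
    let L := lines.getD x ""
    if PySem.Str.isIn (PySem.Int.toStr node) L then
      match pvParse2 L with
      | some (a, b) =>
        match (if a = node then some b else if b = node then some a else none) with
        | some c =>
          if c ∈ patients then pvScanB node lines patients nend (x + 1)
          else some (x, c)
        | none => pvScanB node lines patients nend (x + 1)
      | none => pvScanB node lines patients nend (x + 1)  -- Python raises ValueError here (outside Pre_)
    else pvScanB node lines patients nend (x + 1)
  else none
termination_by nend - x
decreasing_by all_goals simp_wf <;> omega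

-- the outer `while stack` loop
def pvRunB (fuel : Nat) (nend : Nat) (lines : List String) (patients : List Int)
    (stack : List (Int × Nat)) : List Int × List String :=
  match stack with
  | [] => (patients, lines)
  | (node, x) :: rest =>
    match pvScanB node lines patients nend x with
    | none => pvRunB fuel nend lines patients rest
    | some (xr, c) =>
      match fuel with
      | 0 => (patients ++ [c], lines.set xr "USED")  -- never reached with the fuel supplied
      | f + 1 =>
        pvRunB f nend (lines.set xr "USED") (patients ++ [c])
          ((c, 2) :: (node, xr + 1) :: rest)
termination_by (fuel, stack.length)
decreasing_by all_goals simp_wf <;> omega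

def FindInfected_alt (infected : Int) (lines : List String) (patients : List Int) :
    List Int × List String :=
  pvRunB (pvLive lines + 1) (lines.length - 1) lines patients [(infected, 2)]

-- ===== PRECONDITION & SPEC =====

-- Python A raises ValueError when a reached node's decimal string occurs inside an in-range
-- line that does not split into exactly two ints; whether such a line is reached depends on
-- the spread, so Pre_ conservatively excludes every input with an in-range unparseable line
-- containing a digit (on excluded inputs where the bad line is never reached, A still returns
-- and B returns the identical value — see the cite in claim.json).
def Pre_FindInfected (infected : Int) (lines : List String) (patients : List Int) : Prop :=
  ∀ x ∈ List.range lines.length, 2 ≤ x → x + 1 < lines.length →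
    pvParse2 (lines.getD x "") = none →
    (lines.getD x "").toList.all (fun c => !c.isDigit) = true
instance (infected : Int) (lines : List String) (patients : List Int) :
    Decidable (Pre_FindInfected infected lines patients) := by
  unfold Pre_FindInfected; infer_instance

def pvWitness_FindInfected : Int × List String × List Int :=
  (1, ["h", "h", "1 2", "2 3", "t"], [])

def Spec_FindInfected (infected : Int) (lines : List String) (patients : List Int)
    (out : List Int × List String) : Prop := out = FindInfected_alt infected lines patients
instance (infected : Int) (lines : List String) (patients : List Int)
    (out : List Int × List String) : Decidable (Spec_FindInfected infected lines patients out) := by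
  unfold Spec_FindInfected; infer_instance

-- ===== CLAIM (what is proved, stated in full; the proofs are below) =====
def Claim_equal_FindInfected : Prop := ∀ (infected : Int) (lines : List String) (patients : List Int), Dom_FindInfected infected lines patients → Pre_FindInfected infected lines patients → Spec_FindInfected infected lines patients (FindInfected infected lines patients)

-- ===== LEMMAS AND PROOFS =====

theorem pv_parse_empty : pvParse2 "" = none := by decide

theorem pvScanB_oob (node : Int) (lines : List String) (patients : List Int) (nend x : Nat)
    (h : ¬ x < nend) : pvScanB node lines patients nend x = none := by
  rw [pvScanB]; simp [h]

-- a successful scan found a line that really parses (hence lies in range and is "live")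
theorem pvScanB_found (node : Int) (lines : List String) (patients : List Int) (nend : Nat) :
    ∀ m x xr c, nend - x ≤ m → pvScanB node lines patients nend x = some (xr, c) →
      (pvParse2 (lines.getD xr "")).isSome = true ∧ xr < lines.length := by
  intro m
  induction m with
  | zero =>
    intro x xr c hm h
    rw [pvScanB_oob node lines patients nend x (by omega)] at h
    cases h
  | succ m ih =>
    intro x xr c hm h
    rw [pvScanB] at h
    by_cases hx : x < nend
    · rw [dif_pos hx] at h
      dsimp only at h
      cases hIn : PySem.Str.isIn (PySem.Int.toStr node) (lines.getD x "") with
      | false =>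
        rw [hIn] at h; simp only [Bool.false_eq_true, if_false] at h
        exact ih (x + 1) xr c (by omega) h
      | true =>
        rw [hIn] at h; simp only [if_true] at h
        cases hp : pvParse2 (lines.getD x "") with
        | none =>
          rw [hp] at h; dsimp only at h
          exact ih (x + 1) xr c (by omega) h
        | some ab =>
          rw [hp] at h; dsimp only at h
          cases hc : (if ab.1 = node then some ab.2
              else if ab.2 = node then some ab.1 else none) with
          | none =>
            rw [hc] at h; dsimp only at h
            exact ih (x + 1) xr c (by omega) h
          | some c' =>
            rw [hc] at h; dsimp only at h
            by_cases hmem : c' ∈ patients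
            · rw [if_pos hmem] at h
              exact ih (x + 1) xr c (by omega) h
            · rw [if_neg hmem] at h
              simp only [Option.some.injEq, Prod.mk.injEq] at h
              obtain ⟨h1, _h2⟩ := h
              subst h1
              refine ⟨by rw [hp]; rfl, ?_⟩
              by_contra hxl
              rw [List.getD_eq_default _ _ (by omega), pv_parse_empty] at hp
              cases hp
    · rw [dif_neg hx] at h; cases h

-- one level of A's recursion, phrased as B's scan followed by the nested calls
theorem pvGoA_scan (f : Nat) (node : Int) (n : Nat) :
    ∀ m x (lines : List String) (patients : List Int), n - x ≤ m →
      pvGoA f node lines patients n x =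
        (match pvScanB node lines patients (n - 1) x with
         | none => (patients, lines)
         | some (xr, c) =>
           match f with
           | 0 => (patients ++ [c], lines.set xr "USED")
           | f' + 1 =>
             ((fun r => pvGoA (f' + 1) node r.2 r.1 n (xr + 1))
               (pvGoA f' c (lines.set xr "USED") (patients ++ [c]) n 2))) := by
  intro m
  induction m with
  | zero =>
    intro x lines patients hm
    have hg : ¬ x < n - 1 := by omega
    rw [pvGoA, dif_neg hg, pvScanB_oob node lines patients (n - 1) x hg]
  | succ m ih =>
    intro x lines patients hm
    by_cases hg : x < n - 1
    · rw [pvGoA, dif_pos hg]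
      dsimp only
      cases hIn : PySem.Str.isIn (PySem.Int.toStr node) (lines.getD x "") with
      | false =>
        simp only [Bool.false_eq_true, if_false]
        have hscan : pvScanB node lines patients (n - 1) x =
            pvScanB node lines patients (n - 1) (x + 1) := by
          rw [pvScanB, dif_pos hg]
          dsimp only
          rw [hIn]
          simp only [Bool.false_eq_true, if_false]
        rw [ih (x + 1) lines patients (by omega), hscan]
      | true =>
        simp only [if_true]
        cases hp : pvParse2 (lines.getD x "") with
        | none =>
          dsimp only
          have hscan : pvScanB node lines patients (n - 1) x =
              pvScanB node lines patients (n - 1) (x + 1) := by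
            rw [pvScanB, dif_pos hg]
            dsimp only
            rw [hIn]
            simp only [if_true]
            rw [hp]
          rw [ih (x + 1) lines patients (by omega), hscan]
        | some ab =>
          dsimp only
          cases hc : (if ab.1 = node then some ab.2
              else if ab.2 = node then some ab.1 else none) with
          | none =>
            dsimp only
            have hscan : pvScanB node lines patients (n - 1) x =
                pvScanB node lines patients (n - 1) (x + 1) := by
              rw [pvScanB, dif_pos hg]
              dsimp only
              rw [hIn]
              simp only [if_true]
              rw [hp]
              dsimp only
              rw [hc]
            rw [ih (x + 1) lines patients (by omega), hscan]
          | some c =>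
            dsimp only
            by_cases hmem : c ∈ patients
            · rw [if_pos hmem]
              have hscan : pvScanB node lines patients (n - 1) x =
                  pvScanB node lines patients (n - 1) (x + 1) := by
                rw [pvScanB, dif_pos hg]
                dsimp only
                rw [hIn]
                simp only [if_true]
                rw [hp]
                dsimp only
                rw [hc]
                dsimp only
                rw [if_pos hmem]
              rw [ih (x + 1) lines patients (by omega), hscan]
            · rw [if_neg hmem]
              have hscan : pvScanB node lines patients (n - 1) x = some (x, c) := by
                rw [pvScanB, dif_pos hg]
                dsimp only
                rw [hIn]
                simp only [if_true]
                rw [hp]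
                dsimp only
                rw [hc]
                dsimp only
                rw [if_neg hmem]
              rw [hscan]
    · rw [pvGoA, dif_neg hg, pvScanB_oob node lines patients (n - 1) x hg]

-- marking a still-parseable line decrements the number of live lines
theorem pv_live_set {lines : List String} {xr : Nat} (hx : xr < lines.length)
    (hp : (pvParse2 (lines.getD xr "")).isSome = true) :
    pvLive (lines.set xr "USED") + 1 = pvLive lines := by
  unfold pvLive
  rw [List.countP_set hx]
  have h1 : (pvParse2 lines[xr]).isSome = true := by
    rw [← List.getD_eq_getElem lines "" hx]; exact hp
  have h2 : (pvParse2 "USED").isSome = false := by decide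
  have h3 : 0 < lines.countP (fun L => (pvParse2 L).isSome) :=
    List.countP_pos_iff.mpr ⟨lines[xr], List.getElem_mem hx, h1⟩
  simp only [h1, h2, Bool.false_eq_true, if_false, if_true]
  omega

-- A-side resumption: run each suspended frame of A in turn (fuel stored per frame)
def pvResumeA (n : Nat) : List (Nat × Int × Nat) → List String → List Int → List Int × List String
  | [], lines, patients => (patients, lines)
  | (f, node, x) :: rest, lines, patients =>
    pvResumeA n rest (pvGoA f node lines patients n x).2 (pvGoA f node lines patients n x).1

-- B's stack machine computes exactly A's resumed recursion
theorem pv_sim (n : Nat) :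
    ∀ (Lb : Nat) (lines : List String), pvLive lines ≤ Lb →
    ∀ (bstack : List (Int × Nat)) (astack : List (Nat × Int × Nat)) (fb : Nat)
      (patients : List Int),
      pvLive lines < fb →
      (∀ af ∈ astack, pvLive lines < af.1) →
      List.Forall₂ (fun (bf : Int × Nat) (af : Nat × Int × Nat) =>
        bf.1 = af.2.1 ∧ bf.2 = af.2.2) bstack astack →
      pvRunB fb (n - 1) lines patients bstack = pvResumeA n astack lines patients := by
  intro Lb
  induction Lb with
  | zero =>
    intro lines hL bstack
    induction bstack with
    | nil =>
      intro astack fb patients _hfb _hfuel hF2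
      cases hF2
      rw [pvRunB, pvResumeA]
    | cons frame rest ihb =>
      intro astack fb patients hfb hfuel hF2
      obtain ⟨node, x⟩ := frame
      cases hF2 with
      | cons hrel hrest =>
        rename_i af arest
        obtain ⟨fA, anode, ax⟩ := af
        obtain ⟨hnd, hax⟩ := hrel
        dsimp only at hnd hax
        subst hnd; subst hax
        have hunfold := pvGoA_scan fA node n n x lines patients (by omega)
        cases hscan : pvScanB node lines patients (n - 1) x with
        | none =>
          rw [hscan] at hunfold
          rw [pvRunB, hscan, pvResumeA, hunfold]
          exact ihb arest fb patients hfb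
            (fun af haf => hfuel af (List.mem_cons_of_mem _ haf)) hrest
        | some res =>
          obtain ⟨xr, c⟩ := res
          exfalso
          obtain ⟨hp, hxl⟩ := pvScanB_found node lines patients (n - 1) (n - 1) x xr c
            (by omega) hscan
          have := pv_live_set hxl hp
          omega
  | succ Lb ihL =>
    intro lines hL bstack
    induction bstack with
    | nil =>
      intro astack fb patients _hfb _hfuel hF2
      cases hF2
      rw [pvRunB, pvResumeA]
    | cons frame rest ihb =>
      intro astack fb patients hfb hfuel hF2
      obtain ⟨node, x⟩ := frame
      cases hF2 with
      | cons hrel hrest =>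
        rename_i af arest
        obtain ⟨fA, anode, ax⟩ := af
        obtain ⟨hnd, hax⟩ := hrel
        dsimp only at hnd hax
        subst hnd; subst hax
        have hunfold := pvGoA_scan fA node n n x lines patients (by omega)
        cases hscan : pvScanB node lines patients (n - 1) x with
        | none =>
          rw [hscan] at hunfold
          rw [pvRunB, hscan, pvResumeA, hunfold]
          exact ihb arest fb patients hfb
            (fun af haf => hfuel af (List.mem_cons_of_mem _ haf)) hrest
        | some res =>
          obtain ⟨xr, c⟩ := res
          rw [hscan] at hunfold
          obtain ⟨hp, hxl⟩ := pvScanB_found node lines patients (n - 1) (n - 1) x xr c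
            (by omega) hscan
          have hlive := pv_live_set hxl hp
          have hfA : pvLive lines < fA := hfuel (fA, node, x) List.mem_cons_self
          have hpos : 0 < pvLive lines := by omega
          cases fb with
          | zero => omega
          | succ fb' =>
            cases fA with
            | zero => omega
            | succ fA' =>
              rw [pvRunB, hscan]
              dsimp only
              rw [pvResumeA, hunfold]
              dsimp only
              have hgoal := ihL (lines.set xr "USED") (by omega)
                ((c, 2) :: (node, xr + 1) :: rest)
                ((fA', c, 2) :: (fA' + 1, node, xr + 1) :: arest) fb'
                (patients ++ [c]) (by omega)
                (by
                  intro af haf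
                  rcases List.mem_cons.mp haf with h | h
                  · subst h; dsimp only; omega
                  · rcases List.mem_cons.mp h with h' | h'
                    · subst h'; dsimp only; omega
                    · have := hfuel af (List.mem_cons_of_mem _ h')
                      omega)
                (List.forall₂_cons.mpr ⟨⟨rfl, rfl⟩,
                  List.forall₂_cons.mpr ⟨⟨rfl, rfl⟩, hrest⟩⟩)
              rw [hgoal, pvResumeA, pvResumeA]

-- ===== VERDICT (by name: the statement is the Claim_ definition above) =====
theorem FindInfected_spec : Claim_equal_FindInfected := by
  intro infected lines patients _hDom _hPre
  unfold Spec_FindInfected FindInfected FindInfected_alt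
  have h := pv_sim lines.length (pvLive lines) lines (le_refl _)
    [(infected, 2)] [(pvLive lines + 1, infected, 2)] (pvLive lines + 1) patients
    (by omega)
    (by
      intro af haf
      rcases List.mem_cons.mp haf with h | h
      · subst h; dsimp only; omega
      · cases h)
    (List.forall₂_cons.mpr ⟨⟨rfl, rfl⟩, List.Forall₂.nil⟩)
  rw [h, pvResumeA, pvResumeA]
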